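-- pv_equiv track=rewrite | github.com/ColdTbrew/baekjoon_solved | 백준/Silver/1283. 단축키 지정/단축키 지정.py | find_shortcut
-- ===== SOURCE A (Python) =====
-- def find_shortcut(sentence, alpha):
--     words = sentence.split()
--
--     # 1. 첫 글자 규칙 적용
--     for i, word in enumerate(words):
--         first_char = word[0].lower()
--         if first_char not in alpha:
--             alpha.add(first_char)
--
--             words[i] = "[" + word[0] + "]" + word[1:]
--             return " ".join(words)
--
--     # 2. 모든 글자 규칙 적용
--     for i, word in enumerate(words):
--         for j, char in enumerate(word):
--             if char.lower() not in alpha: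
--                 alpha.add(char.lower())
--
--                 words[i] = word[:j] + "[" + char + "]" + word[j+1:]
--                 return " ".join(words)
--
--     return sentence
-- ===== SOURCE B (Python) =====
-- def find_shortcut(sentence, alpha):
--     words = sentence.split()
--     cands = [(0 if j == 0 else 1, i, j)
--              for i, w in enumerate(words)
--              for j, c in enumerate(w)
--              if c.lower() not in alpha]
--     if not cands:
--         return sentence
--     _, i, j = min(cands)
--     w = words[i]
--     alpha.add(w[j].lower())
--     return " ".join(words[:i] + [w[:j] + "[" + w[j] + "]" + w[j+1:]] + words[i+1:])
-- ===== Notes on version B (the rewrite author's own statement) =====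
-- stated objective: alternative
-- what changed: A's two sequential early-exit scan phases (first letters, then all letters) are replaced by a single comprehension collecting every unused (phase, word, position) triple and one min() over the triples' lexicographic priority.
import Mathlib
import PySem

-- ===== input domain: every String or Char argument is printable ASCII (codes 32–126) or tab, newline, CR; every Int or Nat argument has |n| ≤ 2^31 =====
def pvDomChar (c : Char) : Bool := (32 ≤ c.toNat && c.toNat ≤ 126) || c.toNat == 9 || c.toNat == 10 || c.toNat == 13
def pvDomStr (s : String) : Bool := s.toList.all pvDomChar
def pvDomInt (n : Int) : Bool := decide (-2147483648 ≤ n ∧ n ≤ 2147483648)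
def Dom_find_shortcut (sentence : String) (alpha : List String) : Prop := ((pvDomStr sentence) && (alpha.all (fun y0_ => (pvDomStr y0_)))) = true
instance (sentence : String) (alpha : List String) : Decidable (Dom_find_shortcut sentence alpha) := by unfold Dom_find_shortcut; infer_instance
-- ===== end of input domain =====

-- B replaces A's two early-exit scan phases by collecting all unused positions once and
-- selecting the minimum of their (phase, i, j) priority triples (objective: alternative).
-- Both Pythons also add the chosen lowercased letter to the set `alpha` in place (the same
-- element in both); the equivalence proved here is about the RETURN value.

-- `x.lower() not in alpha` test shared by both sources (c a single character)
def fsUsed (alpha : List String) (c : Char) : Bool :=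
  PySem.Set.contains alpha (PySem.Str.lower (String.ofList [c]))

-- ===== PORT A =====
-- phase 1: `for i, word in enumerate(words): …` over the enumerated word list
def fsLoop1 (words : List String) (alpha : List String) : List (Int × String) → Option String
  | [] => none
  | (i, w) :: rest =>
    match PySem.Str.pyGet? w 0 with
    | none => none   -- `word[0]` would raise IndexError; unreachable: split() yields nonempty words
    | some c =>
      if fsUsed alpha c then fsLoop1 words alpha rest
      else some (PySem.Str.join " " (PySem.List.pySetD words i
        ("[" ++ String.ofList [c] ++ "]" ++ PySem.Str.slice w (some 1) none)))

-- phase 2 inner loop: `for j, char in enumerate(word): …`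
def fsLoop2Inner (words : List String) (alpha : List String) (i : Int) (w : String) :
    List (Int × Char) → Option String
  | [] => none
  | (j, c) :: rest =>
    if fsUsed alpha c then fsLoop2Inner words alpha i w rest
    else some (PySem.Str.join " " (PySem.List.pySetD words i
      (PySem.Str.slice w none (some j) ++ "[" ++ String.ofList [c] ++ "]"
        ++ PySem.Str.slice w (some (j + 1)) none)))

-- phase 2 outer loop
def fsLoop2 (words : List String) (alpha : List String) : List (Int × String) → Option String
  | [] => none
  | (i, w) :: rest =>
    match fsLoop2Inner words alpha i w (PySem.List.enumerate w.toList 0) with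
    | some s => some s
    | none => fsLoop2 words alpha rest

def find_shortcut (sentence : String) (alpha : List String) : String :=
  let words := PySem.Str.split₀ sentence
  match fsLoop1 words alpha (PySem.List.enumerate words 0) with
  | some s => s
  | none =>
    match fsLoop2 words alpha (PySem.List.enumerate words 0) with
    | some s => s
    | none => sentence

-- ===== PORT B =====
-- Python's `<` on int triples (lexicographic); `min` keeps the first minimum
def fsbLt (a b : Int × Int × Int) : Bool :=
  decide (a.1 < b.1 ∨ (a.1 = b.1 ∧ (a.2.1 < b.2.1 ∨ (a.2.1 = b.2.1 ∧ a.2.2 < b.2.2))))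

-- `min(cands)` as the running fold it is in Python
def fsbMin : List (Int × Int × Int) → Option (Int × Int × Int)
  | [] => none
  | x :: xs => some (xs.foldl (fun best y => if fsbLt y best then y else best) x)

-- the candidate comprehension of Source B
def fsbCands (alpha : List String) (words : List String) : List (Int × Int × Int) :=
  (PySem.List.enumerate words 0).flatMap fun p =>
    (PySem.List.enumerate p.2.toList 0).filterMap fun q =>
      if fsUsed alpha q.2 then none
      else some ((if q.1 == 0 then (0 : Int) else 1), p.1, q.1)

def find_shortcut_alt (sentence : String) (alpha : List String) : String :=
  let words := PySem.Str.split₀ sentence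
  match fsbMin (fsbCands alpha words) with
  | none => sentence
  | some (_, i, j) =>
    match PySem.List.pyGet? words i with
    | none => sentence   -- unreachable: i was produced by enumerate(words)
    | some w =>
      match PySem.Str.pyGet? w j with
      | none => sentence   -- unreachable: j enumerates a position of w
      | some c =>
        PySem.Str.join " " (PySem.List.slice words none (some i)
          ++ [PySem.Str.slice w none (some j) ++ "[" ++ String.ofList [c] ++ "]"
                ++ PySem.Str.slice w (some (j + 1)) none]
          ++ PySem.List.slice words (some (i + 1)) none)

-- ===== PRECONDITION & SPEC =====
def Spec_find_shortcut (sentence : String) (alpha : List String) (out : String) : Prop := out = find_shortcut_alt sentence alpha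
instance (sentence : String) (alpha : List String) (out : String) : Decidable (Spec_find_shortcut sentence alpha out) := by unfold Spec_find_shortcut; infer_instance

-- ===== CLAIM (what is proved, stated in full; the proofs are below) =====
def Claim_equal_find_shortcut : Prop := ∀ (sentence : String) (alpha : List String), Dom_find_shortcut sentence alpha → Spec_find_shortcut sentence alpha (find_shortcut sentence alpha)

-- ===== LEMMAS AND PROOFS =====

-- first unused position inside one word, from offset j
def selW (alpha : List String) : List Char → Int → Option (Int × Char)
  | [], _ => none
  | c :: cs, j => if fsUsed alpha c then selW alpha cs (j + 1) else some (j, c)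

-- phase 1 selection: first word whose first character is unused
def sel1 (alpha : List String) : List String → Int → Option (Int × String × Char)
  | [], _ => none
  | w :: rest, n =>
    match w.toList with
    | [] => none
    | c :: _ => if fsUsed alpha c then sel1 alpha rest (n + 1) else some (n, w, c)

-- phase 2 selection: first (word, position) that is unused
def sel2 (alpha : List String) : List String → Int → Option (Int × String × Int × Char)
  | [], _ => none
  | w :: rest, n =>
    match selW alpha w.toList 0 with
    | some (j, c) => some (n, w, j, c)
    | none => sel2 alpha rest (n + 1)

def selA (alpha : List String) (ws : List String) (n : Int) : Option (Int × String × Int × Char) :=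
  match sel1 alpha ws n with
  | some (i, w, c) => some (i, w, 0, c)
  | none => sel2 alpha ws n

-- the rendered output once a position is chosen
def outAt (words : List String) (i : Int) (w : String) (j : Int) (c : Char) : String :=
  PySem.Str.join " " (PySem.List.pySetD words i
    (PySem.Str.slice w none (some j) ++ "[" ++ String.ofList [c] ++ "]"
      ++ PySem.Str.slice w (some (j + 1)) none))

-- structural version of the candidate list
def candsW (alpha : List String) (i : Int) : List Char → Int → List (Int × Int × Int)
  | [], _ => []
  | c :: cs, j =>
    if fsUsed alpha c then candsW alpha i cs (j + 1)
    else ((if j == 0 then (0 : Int) else 1), i, j) :: candsW alpha i cs (j + 1)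

def candsE (alpha : List String) : List String → Int → List (Int × Int × Int)
  | [], _ => []
  | w :: rest, n => candsW alpha n w.toList 0 ++ candsE alpha rest (n + 1)


-- ---- generic facts about the Python triple order and min ----

theorem fsbLt_asymm {a b : Int × Int × Int} (h : fsbLt a b = true) : fsbLt b a = false := by
  simp [fsbLt] at *; omega

theorem foldl_min (m : Int × Int × Int) (l : List (Int × Int × Int)) :
    ∀ (b : Int × Int × Int),
      (m = b ∨ m ∈ l) → (∀ y ∈ l, y ≠ m → fsbLt m y = true) → (b ≠ m → fsbLt m b = true) →
      l.foldl (fun best y => if fsbLt y best then y else best) b = m := by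
  induction l with
  | nil =>
      intro b hmem _ _
      rcases hmem with h | h
      · exact h.symm
      · simp at h
  | cons x l ih =>
      intro b hmem hlt hb
      simp only [List.foldl_cons]
      by_cases hx : x = m
      · subst hx
        by_cases hxb : fsbLt x b = true
        · rw [if_pos hxb]
          exact ih x (Or.inl rfl) (fun y hy => hlt y (List.mem_cons_of_mem _ hy))
            (fun h => absurd rfl h)
        · have hbm : b = x := by
            by_contra hne
            exact hxb (hb hne)
          subst hbm
          rw [if_neg hxb]
          exact ih b (Or.inl rfl) (fun y hy => hlt y (List.mem_cons_of_mem _ hy))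
            (fun h => absurd rfl h)
      · have hmx : fsbLt m x = true := hlt x List.mem_cons_self hx
        by_cases hxb : fsbLt x b = true
        · rw [if_pos hxb]
          have hml : m ∈ l := by
            rcases hmem with h | h
            · subst h
              exact absurd hxb (by simp [fsbLt_asymm hmx])
            · rcases List.mem_cons.mp h with h' | h'
              · exact absurd h'.symm hx
              · exact h'
          exact ih x (Or.inr hml) (fun y hy => hlt y (List.mem_cons_of_mem _ hy))
            (fun _ => hmx)
        · rw [if_neg hxb]
          have hml : m = b ∨ m ∈ l := by
            rcases hmem with h | h
            · exact Or.inl h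
            · rcases List.mem_cons.mp h with h' | h'
              · exact absurd h'.symm hx
              · exact Or.inr h'
          exact ih b hml (fun y hy => hlt y (List.mem_cons_of_mem _ hy)) hb

theorem fsbMin_strict {l : List (Int × Int × Int)} {m : Int × Int × Int}
    (hmem : m ∈ l) (hlt : ∀ y ∈ l, y ≠ m → fsbLt m y = true) : fsbMin l = some m := by
  cases l with
  | nil => simp at hmem
  | cons x xs =>
      simp only [fsbMin]
      congr 1
      exact foldl_min m xs x (by rcases List.mem_cons.mp hmem with h | h; exacts [Or.inl h, Or.inr h])
        (fun y hy => hlt y (List.mem_cons_of_mem _ hy))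
        (fun h => hlt x List.mem_cons_self h)

-- ---- bridging the ports' enumerate/filterMap shapes to the structural versions ----

theorem candsW_eq (alpha : List String) (i : Int) (cs : List Char) :
    ∀ (j : Int),
      (PySem.List.enumerate cs j).filterMap (fun q =>
        if fsUsed alpha q.2 then none
        else some ((if q.1 == 0 then (0 : Int) else 1), i, q.1)) = candsW alpha i cs j := by
  induction cs with
  | nil => intro j; simp [PySem.List.enumerate_nil, candsW]
  | cons c cs ih =>
      intro j
      rw [PySem.List.enumerate_cons, List.filterMap_cons]
      by_cases h : fsUsed alpha c = true
      · simp only [h, if_true]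
        rw [candsW, if_pos h, ih (j + 1)]
      · simp only [h, if_false, Bool.false_eq_true]
        rw [candsW, if_neg h, ih (j + 1)]

theorem fsbCands_eq (alpha : List String) (ws : List String) :
    ∀ (n : Int),
      ((PySem.List.enumerate ws n).flatMap fun p =>
        (PySem.List.enumerate p.2.toList 0).filterMap fun q =>
          if fsUsed alpha q.2 then none
          else some ((if q.1 == 0 then (0 : Int) else 1), p.1, q.1)) = candsE alpha ws n := by
  induction ws with
  | nil => intro n; simp [PySem.List.enumerate_nil, candsE]
  | cons w ws ih =>
      intro n
      rw [PySem.List.enumerate_cons, List.flatMap_cons]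
      show _ ++ _ = _
      rw [candsW_eq, candsE, ih (n + 1)]

-- ---- membership shape of the candidate lists ----

theorem mem_candsW (alpha : List String) (i : Int) :
    ∀ (cs : List Char) (j : Int) (y : Int × Int × Int), y ∈ candsW alpha i cs j →
      y.2.1 = i ∧ j ≤ y.2.2 ∧ y.1 = (if y.2.2 == 0 then (0 : Int) else 1)
  | [], j, y => by simp [candsW]
  | c :: cs, j, y => by
      simp only [candsW]
      by_cases h : fsUsed alpha c = true
      · rw [if_pos h]
        intro hy
        have := mem_candsW alpha i cs (j + 1) y hy
        exact ⟨this.1, by omega, this.2.2⟩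
      · rw [if_neg h]
        intro hy
        rcases List.mem_cons.mp hy with h' | h'
        · subst h'; exact ⟨rfl, le_refl _, rfl⟩
        · have := mem_candsW alpha i cs (j + 1) y h'
          exact ⟨this.1, by omega, this.2.2⟩

theorem mem_candsE (alpha : List String) :
    ∀ (ws : List String) (n : Int) (y : Int × Int × Int), y ∈ candsE alpha ws n →
      n ≤ y.2.1 ∧ 0 ≤ y.2.2 ∧ y.1 = (if y.2.2 == 0 then (0 : Int) else 1)
  | [], n, y => by simp [candsE]
  | w :: ws, n, y => by
      simp only [candsE, List.mem_append]
      rintro (hy | hy)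
      · have := mem_candsW alpha n w.toList 0 y hy
        exact ⟨le_of_eq this.1.symm, this.2.1, this.2.2⟩
      · have := mem_candsE alpha ws (n + 1) y hy
        exact ⟨by omega, this.2.1, this.2.2⟩


-- ---- words produced by split() are nonempty ----

theorem split₀_go_ne_nil :
    ∀ (cs cur : List Char) (acc : List (List Char)), (∀ p ∈ acc, p ≠ []) →
      ∀ p ∈ PySem.Chars.split₀.go cs cur acc, p ≠ [] := by
  intro cs
  induction cs with
  | nil =>
      intro cur acc hacc p hp
      simp only [PySem.Chars.split₀.go] at hp
      by_cases hc : cur.isEmpty = true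
      · rw [if_pos hc] at hp
        exact hacc p (List.mem_reverse.mp hp)
      · rw [if_neg hc] at hp
        rcases List.mem_cons.mp (List.mem_reverse.mp hp) with h | h
        · subst h
          simp only [List.isEmpty_iff] at hc
          simpa using hc
        · exact hacc p h
  | cons c cs ih =>
      intro cur acc hacc p hp
      simp only [PySem.Chars.split₀.go] at hp
      by_cases hs : PySem.Chars.isspace c = true
      · rw [if_pos hs] at hp
        by_cases hc : cur.isEmpty = true
        · rw [if_pos hc] at hp
          exact ih [] acc hacc p hp
        · rw [if_neg hc] at hp
          refine ih [] (cur.reverse :: acc) ?_ p hp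
          intro q hq
          rcases List.mem_cons.mp hq with h | h
          · subst h
            simp only [List.isEmpty_iff] at hc
            simpa using hc
          · exact hacc q h
      · rw [if_neg hs] at hp
        exact ih (c :: cur) acc hacc p hp

theorem split₀_ne_empty (s : String) : ∀ w ∈ PySem.Str.split₀ s, w ≠ "" := by
  intro w hw
  unfold PySem.Str.split₀ at hw
  rcases List.mem_map.mp hw with ⟨p, hp, rfl⟩
  rw [PySem.Chars.split₀] at hp
  have hp' : p ≠ [] := split₀_go_ne_nil s.toList [] [] (by simp) p hp
  intro h
  apply hp'
  have : (String.ofList p).toList = ("" : String).toList := by rw [h]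
  simpa using this

-- ---- small string facts ----

theorem slice_zero (w : String) : PySem.Str.slice w none (some 0) = "" := by
  apply String.toList_inj.mp
  rw [PySem.Str.toList_slice, PySem.Chars.slice_eq_listSlice,
    PySem.List.slice_to w.toList (by norm_num : (0:Int) ≤ 0)]
  simp

theorem newJ_zero (w : String) (c : Char) :
    PySem.Str.slice w none (some 0) ++ "[" ++ String.ofList [c] ++ "]"
        ++ PySem.Str.slice w (some (0 + 1)) none
      = "[" ++ String.ofList [c] ++ "]" ++ PySem.Str.slice w (some 1) none := by
  rw [slice_zero]
  norm_num

-- ---- the A-side loops compute the two-phase selection ----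

theorem loop2Inner_eq (words alpha : List String) (i : Int) (w : String) (cs : List Char) :
    ∀ j : Int, fsLoop2Inner words alpha i w (PySem.List.enumerate cs j) =
      (selW alpha cs j).map (fun q => outAt words i w q.1 q.2) := by
  induction cs with
  | nil => intro j; simp [PySem.List.enumerate_nil, fsLoop2Inner, selW]
  | cons c cs ih =>
      intro j
      rw [PySem.List.enumerate_cons]
      simp only [fsLoop2Inner, selW]
      by_cases h : fsUsed alpha c = true
      · rw [if_pos h, if_pos h, ih (j + 1)]
      · rw [if_neg h, if_neg h]
        rfl

theorem loop2_eq (words alpha : List String) (ws : List String) :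
    ∀ n : Int, fsLoop2 words alpha (PySem.List.enumerate ws n) =
      (sel2 alpha ws n).map (fun t => outAt words t.1 t.2.1 t.2.2.1 t.2.2.2) := by
  induction ws with
  | nil => intro n; simp [PySem.List.enumerate_nil, fsLoop2, sel2]
  | cons w ws ih =>
      intro n
      rw [PySem.List.enumerate_cons]
      simp only [fsLoop2, sel2, loop2Inner_eq words alpha n w w.toList 0]
      cases hsw : selW alpha w.toList 0 with
      | none => simp only [Option.map_none]; exact ih (n + 1)
      | some q => rfl

theorem loop1_eq (words alpha : List String) (ws : List String) :
    ∀ n : Int, fsLoop1 words alpha (PySem.List.enumerate ws n) =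
      (sel1 alpha ws n).map (fun t => outAt words t.1 t.2.1 0 t.2.2) := by
  induction ws with
  | nil => intro n; simp [PySem.List.enumerate_nil, fsLoop1, sel1]
  | cons w ws ih =>
      intro n
      rw [PySem.List.enumerate_cons]
      simp only [fsLoop1, sel1]
      have hget : PySem.Str.pyGet? w 0 = w.toList[0]? := by
        simpa using PySem.Str.pyGet?_natCast w 0
      cases hlist : w.toList with
      | nil => rw [hget, hlist]; rfl
      | cons c cs =>
          rw [hget, hlist]
          simp only [List.getElem?_cons_zero]
          by_cases h : fsUsed alpha c = true
          · rw [if_pos h, if_pos h, ih (n + 1)]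
          · rw [if_neg h, if_neg h]
            simp only [Option.map_some]
            unfold outAt
            rw [newJ_zero]

theorem A_eq (sentence : String) (alpha : List String) :
    find_shortcut sentence alpha =
      match selA alpha (PySem.Str.split₀ sentence) 0 with
      | none => sentence
      | some t => outAt (PySem.Str.split₀ sentence) t.1 t.2.1 t.2.2.1 t.2.2.2 := by
  have hA : find_shortcut sentence alpha =
      (match fsLoop1 (PySem.Str.split₀ sentence) alpha
          (PySem.List.enumerate (PySem.Str.split₀ sentence) 0) with
        | some s => s
        | none =>
          match fsLoop2 (PySem.Str.split₀ sentence) alpha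
              (PySem.List.enumerate (PySem.Str.split₀ sentence) 0) with
          | some s => s
          | none => sentence) := rfl
  unfold selA
  rw [hA, loop1_eq _ alpha _ 0, loop2_eq _ alpha _ 0]
  cases h1 : sel1 alpha (PySem.Str.split₀ sentence) 0 with
  | some t => rfl
  | none =>
      simp only [Option.map_none]
      cases h2 : sel2 alpha (PySem.Str.split₀ sentence) 0 with
      | none => rfl
      | some t => rfl


-- ---- relating the selections to the candidate lists ----

theorem selW_spec (alpha : List String) (cs : List Char) :
    ∀ (j0 j : Int) (c : Char), selW alpha cs j0 = some (j, c) →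
      ∃ d : Nat, j = j0 + d ∧ cs[d]? = some c := by
  induction cs with
  | nil => intro j0 j c h; simp [selW] at h
  | cons c' cs ih =>
      intro j0 j c h
      simp only [selW] at h
      by_cases hu : fsUsed alpha c' = true
      · rw [if_pos hu] at h
        obtain ⟨d, hd, hc⟩ := ih (j0 + 1) j c h
        exact ⟨d + 1, by push_cast; omega, by simpa using hc⟩
      · rw [if_neg hu] at h
        obtain ⟨rfl, rfl⟩ : j0 = j ∧ c' = c := by
          simpa using h
        exact ⟨0, by simp, by simp⟩

theorem candsW_selW_none (alpha : List String) (i : Int) (cs : List Char) :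
    ∀ j : Int, selW alpha cs j = none → candsW alpha i cs j = [] := by
  induction cs with
  | nil => intro j _; rfl
  | cons c cs ih =>
      intro j h
      simp only [selW] at h
      by_cases hu : fsUsed alpha c = true
      · rw [if_pos hu] at h
        simp only [candsW, if_pos hu]
        exact ih (j + 1) h
      · rw [if_neg hu] at h
        simp at h

theorem candsW_selW_some (alpha : List String) (i : Int) (cs : List Char) :
    ∀ (j0 j : Int) (c : Char), selW alpha cs j0 = some (j, c) →
      ∃ t, candsW alpha i cs j0 = ((if j == 0 then (0 : Int) else 1), i, j) :: t ∧
        ∀ y ∈ t, j < y.2.2 := by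
  induction cs with
  | nil => intro j0 j c h; simp [selW] at h
  | cons c' cs ih =>
      intro j0 j c h
      simp only [selW] at h
      by_cases hu : fsUsed alpha c' = true
      · rw [if_pos hu] at h
        simp only [candsW, if_pos hu]
        exact ih (j0 + 1) j c h
      · rw [if_neg hu] at h
        obtain ⟨rfl, rfl⟩ : j0 = j ∧ c' = c := by simpa using h
        refine ⟨candsW alpha i cs (j0 + 1), by simp [candsW, hu], ?_⟩
        intro y hy
        have := mem_candsW alpha i cs (j0 + 1) y hy
        omega

theorem sel1_none_cands (alpha : List String) (ws : List String) :
    ∀ n : Int, (∀ w ∈ ws, w ≠ "") → sel1 alpha ws n = none →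
      ∀ y ∈ candsE alpha ws n, 1 ≤ y.2.2 := by
  induction ws with
  | nil => intro n _ _ y hy; simp [candsE] at hy
  | cons w ws ih =>
      intro n hne h1 y hy
      have hwl : w.toList ≠ [] := by
        intro h
        exact hne w List.mem_cons_self (by
          apply String.toList_inj.mp; simpa using h)
      cases hlist : w.toList with
      | nil => exact absurd hlist hwl
      | cons c cs =>
          simp only [sel1, hlist] at h1
          by_cases hu : fsUsed alpha c = true
          · rw [if_pos hu] at h1
            simp only [candsE, hlist, List.mem_append] at hy
            rcases hy with hy | hy
            · simp only [candsW, if_pos hu] at hy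
              have := mem_candsW alpha n cs 1 y hy
              omega
            · exact ih (n + 1) (fun w' hw' => hne w' (List.mem_cons_of_mem _ hw')) h1 y hy
          · rw [if_neg hu] at h1
            simp at h1

-- phase-1 hit: its position is the strict minimum of the candidate list
theorem sel1_found (alpha : List String) (ws : List String) :
    ∀ (n : Nat) (i : Int) (w : String) (c : Char), sel1 alpha ws (n : Int) = some (i, w, c) →
      (∃ k : Nat, i = ((n + k : Nat) : Int) ∧ ws[k]? = some w) ∧
      w.toList[0]? = some c ∧
      ((0 : Int), i, 0) ∈ candsE alpha ws (n : Int) ∧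
      (∀ y ∈ candsE alpha ws (n : Int), y ≠ ((0 : Int), i, 0) →
        fsbLt ((0 : Int), i, 0) y = true) := by
  induction ws with
  | nil => intro n i w c h; simp [sel1] at h
  | cons w' ws ih =>
      intro n i w c h
      cases hlist : w'.toList with
      | nil => simp [sel1, hlist] at h
      | cons c0 cs =>
          simp only [sel1, hlist] at h
          by_cases hu : fsUsed alpha c0 = true
          · rw [if_pos hu] at h
            have hcast : ((n : Int) + 1) = ((n + 1 : Nat) : Int) := by push_cast; omega
            rw [hcast] at h
            obtain ⟨⟨k, hk, hws⟩, hc, hmem, hlt⟩ := ih (n + 1) i w c h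
            refine ⟨⟨k + 1, by push_cast at hk ⊢; omega, by simpa using hws⟩, hc, ?_, ?_⟩
            · simp only [candsE, hlist, List.mem_append]
              right
              rw [hcast]
              exact hmem
            · intro y hy hyne
              simp only [candsE, hlist, List.mem_append] at hy
              rcases hy with hy | hy
              · simp only [candsW, if_pos hu] at hy
                obtain ⟨hyi, hyj, hyf⟩ := mem_candsW alpha (n : Int) cs 1 y hy
                simp only [fsbLt, decide_eq_true_eq]
                have : y.1 = 1 := by
                  rw [hyf, if_neg (by simpa using (by omega : ¬ y.2.2 = 0))]
                omega
              · rw [hcast] at hy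
                exact hlt y hy hyne
          · rw [if_neg hu] at h
            obtain ⟨rfl, rfl, rfl⟩ : (n : Int) = i ∧ w' = w ∧ c0 = c := by simpa using h
            refine ⟨⟨0, by simp, by simp⟩, by simp [hlist], ?_, ?_⟩
            · simp only [candsE, hlist, List.mem_append]
              left
              simp [candsW, hu]
            · intro y hy hyne
              simp only [candsE, hlist, List.mem_append] at hy
              rcases hy with hy | hy
              · simp only [candsW, if_neg hu] at hy
                rcases List.mem_cons.mp hy with hy | hy
                · exact absurd (by simpa using hy) hyne
                · obtain ⟨hyi, hyj, hyf⟩ := mem_candsW alpha (n : Int) cs 1 y hy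
                  simp only [fsbLt, decide_eq_true_eq]
                  have : y.1 = 1 := by
                    rw [hyf, if_neg (by simpa using (by omega : ¬ y.2.2 = 0))]
                  omega
              · obtain ⟨hyi, hyj, hyf⟩ := mem_candsE alpha ws ((n : Int) + 1) y hy
                simp only [fsbLt, decide_eq_true_eq]
                have : y.1 = 0 ∨ y.1 = 1 := by
                  rw [hyf]; by_cases h0 : y.2.2 = 0 <;> simp [h0]
                omega

-- phase-2 hit (phase 1 empty): its position is the strict minimum of the candidate list
theorem sel2_found (alpha : List String) (ws : List String) :
    ∀ (n : Nat) (i : Int) (w : String) (j : Int) (c : Char), (∀ w' ∈ ws, w' ≠ "") →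
      sel1 alpha ws (n : Int) = none → sel2 alpha ws (n : Int) = some (i, w, j, c) →
      (∃ k : Nat, i = ((n + k : Nat) : Int) ∧ ws[k]? = some w) ∧
      (∃ jn : Nat, j = (jn : Int) ∧ w.toList[jn]? = some c) ∧ 1 ≤ j ∧
      ((1 : Int), i, j) ∈ candsE alpha ws (n : Int) ∧
      (∀ y ∈ candsE alpha ws (n : Int), y ≠ ((1 : Int), i, j) →
        fsbLt ((1 : Int), i, j) y = true) := by
  induction ws with
  | nil => intro n i w j c _ _ h2; simp [sel2] at h2
  | cons w' ws ih =>
      intro n i w j c hne h1 h2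
      have hwl : w'.toList ≠ [] := by
        intro h
        exact hne w' List.mem_cons_self (by apply String.toList_inj.mp; simpa using h)
      cases hlist : w'.toList with
      | nil => exact absurd hlist hwl
      | cons c0 cs =>
          simp only [sel1, hlist] at h1
          by_cases hu : fsUsed alpha c0 = true
          · rw [if_pos hu] at h1
            simp only [sel2, hlist, selW, if_pos hu, zero_add] at h2
            have hcast : ((n : Int) + 1) = ((n + 1 : Nat) : Int) := by push_cast; omega
            cases hsw : selW alpha cs 1 with
            | some q =>
                rcases q with ⟨j', c'⟩
                rw [hsw] at h2
                obtain ⟨hi, hw, hj, hc⟩ :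
                    (n : Int) = i ∧ w' = w ∧ j' = j ∧ c' = c := by simpa using h2
                subst hi; subst hw; subst hj; subst hc
                obtain ⟨d, hd, hcd⟩ := selW_spec alpha cs 1 j' c' hsw
                have hj1 : 1 ≤ j' := by omega
                refine ⟨⟨0, by simp, by simp⟩,
                  ⟨d + 1, by push_cast; omega, by rw [hlist]; simpa using hcd⟩, hj1, ?_, ?_⟩
                · obtain ⟨t, ht, htj⟩ := candsW_selW_some alpha (n : Int) cs 1 j' c' hsw
                  simp only [candsE, hlist, List.mem_append]
                  left
                  simp only [candsW, if_pos hu, zero_add, ht]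
                  rw [if_neg (by simpa using (by omega : ¬ j' = 0))]
                  exact List.mem_cons_self
                · intro y hy hyne
                  simp only [candsE, hlist, List.mem_append] at hy
                  rcases hy with hy | hy
                  · simp only [candsW, if_pos hu, zero_add] at hy
                    obtain ⟨t, ht, htj⟩ := candsW_selW_some alpha (n : Int) cs 1 j' c' hsw
                    rw [ht] at hy
                    rw [if_neg (by simpa using (by omega : ¬ j' = 0))] at hy
                    rcases List.mem_cons.mp hy with hy | hy
                    · exact absurd (by simpa using hy) hyne
                    · obtain ⟨hyi, hyj, hyf⟩ := mem_candsW alpha (n : Int) cs 1 y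
                        (by rw [ht]; exact List.mem_cons_of_mem _ hy)
                      have hjy := htj y hy
                      simp only [fsbLt, decide_eq_true_eq]
                      have : y.1 = 1 := by
                        rw [hyf, if_neg (by simpa using (by omega : ¬ y.2.2 = 0))]
                      omega
                  · obtain ⟨hyi, hyj, hyf⟩ := mem_candsE alpha ws ((n : Int) + 1) y hy
                    have hy1 : 1 ≤ y.2.2 := by
                      rw [hcast] at h1 hy
                      exact sel1_none_cands alpha ws _
                        (fun w'' hw'' => hne w'' (List.mem_cons_of_mem _ hw'')) h1 y hy
                    simp only [fsbLt, decide_eq_true_eq]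
                    have : y.1 = 1 := by
                      rw [hyf, if_neg (by simpa using (by omega : ¬ y.2.2 = 0))]
                    omega
            | none =>
                rw [hsw] at h2
                rw [hcast] at h1 h2
                obtain ⟨⟨k, hk, hws⟩, hjn, hj1, hmem, hlt⟩ :=
                  ih (n + 1) i w j c (fun w'' hw'' => hne w'' (List.mem_cons_of_mem _ hw'')) h1 h2
                have hW : candsW alpha (n : Int) w'.toList 0 = [] := by
                  rw [hlist]
                  simp only [candsW, if_pos hu]
                  exact candsW_selW_none alpha (n : Int) cs 1 hsw
                refine ⟨⟨k + 1, by push_cast at hk ⊢; omega, by simpa using hws⟩, hjn, hj1, ?_, ?_⟩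
                · simp only [candsE, List.mem_append, hW]
                  right
                  rw [hcast]
                  exact hmem
                · intro y hy hyne
                  simp only [candsE, List.mem_append, hW] at hy
                  rcases hy with hy | hy
                  · simp at hy
                  · exact hlt y hy hyne
          · rw [if_neg hu] at h1
            simp at h1

theorem selA_none_cands (alpha : List String) (ws : List String) :
    ∀ n : Int, (∀ w ∈ ws, w ≠ "") → sel1 alpha ws n = none → sel2 alpha ws n = none →
      candsE alpha ws n = [] := by
  induction ws with
  | nil => intro n _ _ _; rfl
  | cons w ws ih =>
      intro n hne h1 h2
      have hwl : w.toList ≠ [] := by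
        intro h
        exact hne w List.mem_cons_self (by apply String.toList_inj.mp; simpa using h)
      cases hlist : w.toList with
      | nil => exact absurd hlist hwl
      | cons c cs =>
          simp only [sel1, hlist] at h1
          by_cases hu : fsUsed alpha c = true
          · rw [if_pos hu] at h1
            simp only [sel2, hlist, selW, if_pos hu, zero_add] at h2
            cases hsw : selW alpha cs 1 with
            | some q => rw [hsw] at h2; simp at h2
            | none =>
                rw [hsw] at h2
                simp only [candsE, hlist, candsW, if_pos hu, zero_add]
                rw [candsW_selW_none alpha n cs 1 hsw,
                  ih (n + 1) (fun w' hw' => hne w' (List.mem_cons_of_mem _ hw')) h1 h2]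
                rfl
          · rw [if_neg hu] at h1
            simp at h1


-- ---- B's slice-rebuild of the word list equals A's in-place assignment ----

theorem outAt_alt (words : List String) (k : Nat) (w : String) (j : Int) (c : Char)
    (hk : k < words.length) :
    PySem.Str.join " " (PySem.List.slice words none (some (k : Int))
        ++ [PySem.Str.slice w none (some j) ++ "[" ++ String.ofList [c] ++ "]"
              ++ PySem.Str.slice w (some (j + 1)) none]
        ++ PySem.List.slice words (some ((k : Int) + 1)) none)
      = outAt words (k : Int) w j c := by
  unfold outAt
  congr 1
  rw [PySem.List.slice_to words (by positivity : (0 : Int) ≤ (k : Int)),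
    PySem.List.slice_from words (by positivity : (0 : Int) ≤ (k : Int) + 1)]
  have hset : PySem.List.pySetD words (k : Int)
      (PySem.Str.slice w none (some j) ++ "[" ++ String.ofList [c] ++ "]"
        ++ PySem.Str.slice w (some (j + 1)) none) = words.set k
      (PySem.Str.slice w none (some j) ++ "[" ++ String.ofList [c] ++ "]"
        ++ PySem.Str.slice w (some (j + 1)) none) := by
    unfold PySem.List.pySetD
    rw [PySem.List.pySet?_natCast _ _ _ hk]
    rfl
  rw [hset, List.set_eq_take_cons_drop _ hk]
  have h1 : ((k : Int)).toNat = k := Int.toNat_natCast k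
  have h2 : ((k : Int) + 1).toNat = k + 1 := by omega
  rw [h1, h2]
  simp

-- ===== VERDICT (by name: the statement is the Claim_ definition above) =====
theorem find_shortcut_spec : Claim_equal_find_shortcut := by
  intro sentence alpha _
  unfold Spec_find_shortcut
  have hne := split₀_ne_empty sentence
  have hB : find_shortcut_alt sentence alpha =
      (match fsbMin (fsbCands alpha (PySem.Str.split₀ sentence)) with
        | none => sentence
        | some (_, i, j) =>
          match PySem.List.pyGet? (PySem.Str.split₀ sentence) i with
          | none => sentence
          | some w =>
            match PySem.Str.pyGet? w j with
            | none => sentence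
            | some c =>
              PySem.Str.join " " (PySem.List.slice (PySem.Str.split₀ sentence) none (some i)
                ++ [PySem.Str.slice w none (some j) ++ "[" ++ String.ofList [c] ++ "]"
                      ++ PySem.Str.slice w (some (j + 1)) none]
                ++ PySem.List.slice (PySem.Str.split₀ sentence) (some (i + 1)) none)) := rfl
  have hC : fsbCands alpha (PySem.Str.split₀ sentence)
      = candsE alpha (PySem.Str.split₀ sentence) 0 := by
    unfold fsbCands
    exact fsbCands_eq alpha _ 0
  rw [A_eq, hB, hC]
  unfold selA
  cases h1 : sel1 alpha (PySem.Str.split₀ sentence) 0 with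
  | some t =>
      rcases t with ⟨i, w, c⟩
      obtain ⟨⟨k, hk, hwk⟩, hc0, hmem, hlt⟩ :=
        sel1_found alpha (PySem.Str.split₀ sentence) 0 i w c (by simpa using h1)
      simp only [Nat.cast_zero] at hmem hlt
      have hk' : i = (k : Int) := by push_cast at hk; omega
      have hmin : fsbMin (candsE alpha (PySem.Str.split₀ sentence) 0) = some (0, i, 0) :=
        fsbMin_strict hmem hlt
      have hkl : k < (PySem.Str.split₀ sentence).length :=
        (List.getElem?_eq_some_iff.mp hwk).1
      have hgw : PySem.List.pyGet? (PySem.Str.split₀ sentence) i = some w := by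
        rw [hk', PySem.List.pyGet?_natCast]
        exact hwk
      have hgc : PySem.Str.pyGet? w 0 = some c := by
        simpa using (PySem.Str.pyGet?_natCast w 0).trans hc0
      simp only [hmin]
      simp only [hgw]
      simp only [hgc]
      rw [hk']
      exact (outAt_alt (PySem.Str.split₀ sentence) k w 0 c hkl).symm
  | none =>
      cases h2 : sel2 alpha (PySem.Str.split₀ sentence) 0 with
      | none =>
          have hnil : candsE alpha (PySem.Str.split₀ sentence) 0 = [] :=
            selA_none_cands alpha _ 0 hne h1 h2
          rw [hnil]
          rfl
      | some t =>
          rcases t with ⟨i, w, j, c⟩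
          obtain ⟨⟨k, hk, hwk⟩, ⟨jn, hj, hcj⟩, hj1, hmem, hlt⟩ :=
            sel2_found alpha (PySem.Str.split₀ sentence) 0 i w j c hne
              (by simpa using h1) (by simpa using h2)
          simp only [Nat.cast_zero] at hmem hlt
          have hk' : i = (k : Int) := by push_cast at hk; omega
          have hmin : fsbMin (candsE alpha (PySem.Str.split₀ sentence) 0) = some (1, i, j) :=
            fsbMin_strict hmem hlt
          have hkl : k < (PySem.Str.split₀ sentence).length :=
            (List.getElem?_eq_some_iff.mp hwk).1
          have hgw : PySem.List.pyGet? (PySem.Str.split₀ sentence) i = some w := by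
            rw [hk', PySem.List.pyGet?_natCast]
            exact hwk
          have hgc : PySem.Str.pyGet? w j = some c := by
            rw [hj, PySem.Str.pyGet?_natCast]
            exact hcj
          simp only [hmin]
          simp only [hgw]
          simp only [hgc]
          rw [hk']
          exact (outAt_alt (PySem.Str.split₀ sentence) k w j c hkl).symm
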